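-- pv_equiv track=rewrite | github.com/demjanp/deposit | bin/tst_prune.py | __prune_new
-- ===== SOURCE A (Python) =====
-- from collections import defaultdict
-- from itertools import combinations
--
-- def __prune_new(paths):
--
-- 	paths_ = defaultdict(set)
-- 	for path in paths:
-- 		paths_[len(path)].add(path)
-- 	lens = sorted(paths_.keys())[::-1]
-- 	if len(lens) < 2:
-- 		return paths
--
-- 	paths = paths.copy()
-- 	for i in range(len(lens) - 1):
-- 		for path in paths_[lens[i]]:
-- 			for j in range(i + 1, len(lens)):
-- 				for subpath in combinations(path, lens[j]):
-- 					if subpath in paths_[lens[j]]: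
-- 						paths_[lens[j]].remove(subpath)
--
-- 	return set.union(*paths_.values())
-- ===== SOURCE B (Python) =====
-- def _is_subseq(sub, sup):
-- 	if not sub:
-- 		return True
-- 	if not sup:
-- 		return False
-- 	if sub[0] == sup[0]:
-- 		return _is_subseq(sub[1:], sup[1:])
-- 	return _is_subseq(sub, sup[1:])
--
-- def __prune_new(paths):
-- 	groups = {}
-- 	for p in paths:
-- 		groups.setdefault(len(p), []).append(p)
-- 	out = set()
-- 	for ln, grp in groups.items():
-- 		longer = [q for q in paths if len(q) > ln]
-- 		for p in grp:
-- 			if not any(_is_subseq(p, q) for q in longer):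
-- 				out.add(p)
-- 	return out
-- ===== Notes on version B (the rewrite author's own statement) =====
-- stated objective: alternative
-- what changed: B replaces A's enumeration of all C(len(path), k) length-k combinations of every longer path (with in-place mutation of length-bucketed sets) by a direct two-pointer subsequence test of each path against the longer paths, grouping by length once and never mutating the groups.
import Mathlib
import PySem

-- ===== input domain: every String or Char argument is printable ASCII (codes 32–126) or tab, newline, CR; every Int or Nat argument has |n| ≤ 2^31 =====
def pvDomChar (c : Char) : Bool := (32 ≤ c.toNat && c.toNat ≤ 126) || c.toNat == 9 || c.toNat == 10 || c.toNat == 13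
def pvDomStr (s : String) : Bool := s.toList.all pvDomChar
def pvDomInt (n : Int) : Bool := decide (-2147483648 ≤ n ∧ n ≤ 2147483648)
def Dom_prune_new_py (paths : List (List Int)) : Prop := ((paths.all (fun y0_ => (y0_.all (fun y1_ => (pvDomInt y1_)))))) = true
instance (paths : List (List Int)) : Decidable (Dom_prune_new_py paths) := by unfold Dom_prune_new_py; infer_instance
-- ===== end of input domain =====

-- B replaces A's enumeration of all C(len(path), k) combinations of longer paths by a direct
-- two-pointer subsequence test of each path against the longer paths (objective: alternative).

-- ===== PORT A =====
-- itertools.combinations(path, r): the subsequences of length r, in combinations' order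
def combosA : List Int → Nat → List (List Int)
  | _, 0 => [[]]
  | [], _ + 1 => []
  | x :: xs, r + 1 => (combosA xs r).map (fun t => x :: t) ++ combosA xs (r + 1)

-- 'if subpath in paths_[lens[j]]: paths_[lens[j]].remove(subpath)'
-- (set.remove of an element guarded by 'in' is exactly Set.discard: PySem.Set.remove? returns discard there)
def removeSub (d : PySem.Dict Int (PySem.Set (List Int))) (lj : Int) (sub : List Int) :
    PySem.Dict Int (PySem.Set (List Int)) :=
  if PySem.Set.contains (d.getD lj PySem.Set.empty) sub then
    d.insert lj (PySem.Set.discard (d.getD lj PySem.Set.empty) sub)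
  else d

-- 'for i in range(len(lens)-1): for path in paths_[lens[i]]: for j in range(i+1, len(lens)):
--      for subpath in combinations(path, lens[j]): …'
-- as structural recursion on lens (for the last i the inner j-range is empty, so including it is a no-op).
-- The iterated set paths_[lens[i]] is only mutated at the strictly smaller keys lens[j], j > i, so the
-- snapshot is exact; lens[j] is a path length, hence ≥ 0, so .toNat is exact for combinations' count.
def pruneLoopA : List Int → PySem.Dict Int (PySem.Set (List Int)) → PySem.Dict Int (PySem.Set (List Int))
  | [], d => d
  | l :: rest, d =>
    pruneLoopA rest
      ((d.getD l PySem.Set.empty).foldl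
        (fun d path =>
          rest.foldl (fun d lj => (combosA path lj.toNat).foldl (fun d sub => removeSub d lj sub) d) d)
        d)

-- paths_ = defaultdict(set); for path in paths: paths_[len(path)].add(path)
def buildGroupsA (paths : List (List Int)) : PySem.Dict Int (PySem.Set (List Int)) :=
  paths.foldl
    (fun d path => d.modify ((path.length : Int)) PySem.Set.empty (fun s => PySem.Set.add s path))
    PySem.Dict.empty

def prune_new_py (paths : List (List Int)) : List (List Int) :=
  let paths_ := buildGroupsA paths
  -- lens = sorted(paths_.keys())[::-1]   ([::-1] of a list is reverse)
  let lens := (PySem.List.sorted paths_.keys (fun x => x) false).reverse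
  if lens.length < 2 then paths
  else
    -- 'paths = paths.copy()' rebinds a local that is never read again: no effect on the returned value
    let paths_ := pruneLoopA lens paths_
    -- set.union(*paths_.values()); values is nonempty here, so folding union from the empty set is exact
    paths_.values.foldl (fun acc s => PySem.Set.union acc s) PySem.Set.empty

-- ===== PORT B =====
-- _is_subseq from Source B (two-pointer subsequence test, written recursively)
def isSubseqB : List Int → List Int → Bool
  | [], _ => true
  | _ :: _, [] => false
  | a :: s, x :: xs => if a = x then isSubseqB s xs else isSubseqB (a :: s) xs

-- groups.setdefault(len(p), []).append(p)
def buildGroupsB (paths : List (List Int)) : PySem.Dict Int (List (List Int)) :=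
  paths.foldl (fun d p => d.modify ((p.length : Int)) [] (fun g => g ++ [p])) PySem.Dict.empty

def prune_new_py_alt (paths : List (List Int)) : List (List Int) :=
  (buildGroupsB paths).items.foldl
    (fun out kv =>
      let longer := paths.filter (fun q => decide (kv.1 < (q.length : Int)))
      kv.2.foldl (fun out p => if longer.any (fun q => isSubseqB p q) then out else PySem.Set.add out p) out)
    PySem.Set.empty

-- ===== PRECONDITION & SPEC =====
-- The Python argument is a set of tuples; Pre_ states that List encoding's invariant: distinct elements.
def Pre_prune_new_py (paths : List (List Int)) : Prop := paths.Nodup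
instance (paths : List (List Int)) : Decidable (Pre_prune_new_py paths) := by
  unfold Pre_prune_new_py; infer_instance
def pvWitness_prune_new_py : List (List Int) := [[1, 2, 3], [1, 3], [2]]

def Spec_prune_new_py (paths : List (List Int)) (out : List (List Int)) : Prop :=
  out = prune_new_py_alt paths
instance (paths : List (List Int)) (out : List (List Int)) : Decidable (Spec_prune_new_py paths out) := by
  unfold Spec_prune_new_py; infer_instance

-- ===== CLAIM (what is proved, stated in full; the proofs are below) =====
def Claim_equal_prune_new_py : Prop :=
  ∀ (paths : List (List Int)), Dom_prune_new_py paths → Pre_prune_new_py paths →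
    Spec_prune_new_py paths (prune_new_py paths)

-- ===== LEMMAS AND PROOFS =====

-- B's helper is the subsequence test
theorem isSubseqB_eq_isSublist : ∀ p q : List Int, isSubseqB p q = p.isSublist q := by
  intro p q
  induction q generalizing p with
  | nil => cases p <;> rfl
  | cons x xs ih =>
    cases p with
    | nil => rfl
    | cons a s =>
      simp only [isSubseqB, List.isSublist, beq_iff_eq]
      split <;> exact ih _

theorem isSubseqB_iff (p q : List Int) : isSubseqB p q = true ↔ List.Sublist p q := by
  rw [isSubseqB_eq_isSublist]; exact List.isSublist_iff_sublist

-- combinations(path, r) enumerates exactly the length-r subsequences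
theorem mem_combosA : ∀ (xs : List Int) (r : Nat) (sub : List Int),
    sub ∈ combosA xs r ↔ List.Sublist sub xs ∧ sub.length = r := by
  intro xs
  induction xs with
  | nil =>
    intro r sub
    cases r with
    | zero => simp [combosA, List.length_eq_zero_iff]
    | succ r =>
      simp only [combosA, List.not_mem_nil, false_iff, not_and]
      intro h
      simp [List.sublist_nil.mp h]
  | cons x xs ih =>
    intro r sub
    cases r with
    | zero =>
      simp only [combosA, List.mem_singleton]
      constructor
      · rintro rfl; exact ⟨List.nil_sublist _, rfl⟩
      · rintro ⟨_, h⟩; exact List.length_eq_zero_iff.mp h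
    | succ r =>
      simp only [combosA, List.mem_append, List.mem_map, ih, List.sublist_cons_iff]
      constructor
      · rintro (⟨t, ⟨hsub, hlen⟩, rfl⟩ | ⟨hsub, hlen⟩)
        · exact ⟨Or.inr ⟨t, rfl, hsub⟩, by simp [hlen]⟩
        · exact ⟨Or.inl hsub, hlen⟩
      · rintro ⟨hsub | ⟨t, rfl, ht⟩, hlen⟩
        · exact Or.inr ⟨hsub, hlen⟩
        · exact Or.inl ⟨t, ⟨ht, by simpa using hlen⟩, rfl⟩

-- with pairwise-distinct paths, A's defaultdict-of-sets build equals B's dict-of-lists build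
theorem build_eq_aux : ∀ (l : List (List Int)) (d : PySem.Dict Int (List (List Int))),
    (∀ p ∈ l, p ∉ d.getD ((p.length : Int)) []) → l.Nodup →
    l.foldl (fun d path => d.modify ((path.length : Int)) PySem.Set.empty (fun s => PySem.Set.add s path)) d
      = l.foldl (fun d p => d.modify ((p.length : Int)) [] (fun g => g ++ [p])) d := by
  intro l
  induction l with
  | nil => intro d _ _; rfl
  | cons p l ih =>
    intro d hnotin hnd
    simp only [List.foldl_cons]
    have hstep : d.modify ((p.length : Int)) PySem.Set.empty (fun s => PySem.Set.add s p)
        = d.modify ((p.length : Int)) [] (fun g => g ++ [p]) := by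
      show d.insert _ (PySem.Set.add (d.getD _ PySem.Set.empty) p) = d.insert _ (d.getD _ [] ++ [p])
      rw [show (PySem.Set.empty : PySem.Set (List Int)) = [] from rfl]
      rw [PySem.Set.add_of_not_mem (hnotin p List.mem_cons_self)]
    rw [hstep]
    apply ih
    · intro q hq
      rw [PySem.Dict.getD_modify]
      split
      · rename_i heq
        have hold := hnotin q (List.mem_cons_of_mem _ hq)
        have hne : q ≠ p := fun h => (List.nodup_cons.mp hnd).1 (h ▸ hq)
        rw [heq] at hold
        simp only [List.mem_append, List.mem_singleton]
        rintro (h | h)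
        · exact hold h
        · exact hne h
      · exact hnotin q (List.mem_cons_of_mem _ hq)
    · exact (List.nodup_cons.mp hnd).2

theorem build_eq (paths : List (List Int)) (hnd : paths.Nodup) :
    buildGroupsA paths = buildGroupsB paths := by
  unfold buildGroupsA buildGroupsB
  apply build_eq_aux paths PySem.Dict.empty _ hnd
  intro p _
  simp [PySem.Dict.getD_empty]

-- characterisation of B's grouping dict
theorem groupsB_getD (paths : List (List Int)) (k : Int) :
    (buildGroupsB paths).getD k [] = paths.filter (fun p => ((p.length : Int) == k)) := by
  unfold buildGroupsB
  have h : paths.foldl (fun d p => d.modify ((p.length : Int)) [] (fun g => g ++ [p])) PySem.Dict.empty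
      = (paths.map (fun p => ((p.length : Int), p))).foldl
          (fun d q => d.modify q.1 [] (fun g => g ++ [q.2])) PySem.Dict.empty := by
    rw [List.foldl_map]
  rw [h, PySem.Dict.getD_foldl_modify_append, PySem.Dict.getD_empty]
  simp [List.filter_map, Function.comp_def]

theorem groupsB_keys (paths : List (List Int)) :
    (buildGroupsB paths).keys = PySem.Set.ofList (paths.map (fun p => ((p.length : Int)))) := by
  unfold buildGroupsB
  rw [PySem.Dict.keys_foldl_modify_key paths (fun p => ((p.length : Int))) [] (fun _ p => (fun g => g ++ [p]))]
  rw [PySem.Dict.keys_empty, PySem.Set.update_nil_left]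

theorem groupsB_keys_nodup (paths : List (List Int)) : (buildGroupsB paths).keys.Nodup := by
  rw [groupsB_keys]; exact PySem.Set.nodup_ofList _

theorem groupsB_item_snd (paths : List (List Int)) {k : Int} {g : List (List Int)}
    (h : (k, g) ∈ (buildGroupsB paths).items) :
    g = paths.filter (fun p => ((p.length : Int) == k)) := by
  have := PySem.Dict.getD_of_mem_items _ h (groupsB_keys_nodup paths) []
  rw [← this, groupsB_getD]

theorem groupsB_item_of_key (paths : List (List Int)) {k : Int}
    (h : k ∈ (buildGroupsB paths).keys) :
    (k, paths.filter (fun p => ((p.length : Int) == k))) ∈ (buildGroupsB paths).items := by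
  have hc : (buildGroupsB paths).contains k = true := (PySem.Dict.contains_iff_mem_keys _ _).mpr h
  have hsome : ∃ v, (buildGroupsB paths).get? k = some v := by
    rcases hg : (buildGroupsB paths).get? k with _ | v
    · rw [PySem.Dict.get?_eq_none_iff_contains] at hg
      rw [hg] at hc; cases hc
    · exact ⟨v, rfl⟩
  obtain ⟨v, hv⟩ := hsome
  have hgd : (buildGroupsB paths).getD k [] = v := PySem.Dict.getD_of_get?_eq_some _ _ hv
  rw [groupsB_getD] at hgd
  rw [hgd]
  exact PySem.Dict.mem_items_of_get?_eq_some _ hv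

-- removing one element from the set at one key, at the items level
theorem removeSub_items (d : PySem.Dict Int (List (List Int))) (l : Int) (sub : List Int)
    (hk : d.keys.Nodup) :
    (removeSub d l sub).items
      = d.items.map (fun kv => if kv.1 = l then (kv.1, kv.2.filter (fun x => !(x == sub))) else kv) := by
  unfold removeSub
  by_cases hc : d.contains l = true
  · have hsome : ∃ v, d.get? l = some v := by
      rcases hg : d.get? l with _ | v
      · rw [PySem.Dict.get?_eq_none_iff_contains] at hg; rw [hg] at hc; cases hc
      · exact ⟨v, rfl⟩
    obtain ⟨v, hv⟩ := hsome
    have hgd : d.getD l PySem.Set.empty = v := PySem.Dict.getD_of_get?_eq_some _ _ hv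
    rw [hgd]
    by_cases hs : PySem.Set.contains v sub = true
    · rw [if_pos hs, PySem.Dict.items_insert_of_contains d _ hc]
      apply List.map_congr_left
      rintro ⟨k2, g2⟩ hkv
      by_cases hkl : k2 = l
      · subst hkl
        have hget : d.get? k2 = some g2 := PySem.Dict.get?_of_mem_items _ hkv hk
        have hg2 : g2 = v := Option.some_inj.mp (hget.symm.trans hv)
        subst hg2
        simp [PySem.Set.discard]
      · simp [hkl]
    · rw [if_neg hs]
      conv_lhs => rw [← List.map_id d.items]
      apply List.map_congr_left
      rintro ⟨k2, g2⟩ hkv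
      by_cases hkl : k2 = l
      · subst hkl
        have hget : d.get? k2 = some g2 := PySem.Dict.get?_of_mem_items _ hkv hk
        have hg2 : g2 = v := Option.some_inj.mp (hget.symm.trans hv)
        subst hg2
        have hnotin : sub ∉ g2 := fun hmem => hs ((PySem.Set.contains_iff _ _).mpr hmem)
        have hfe : g2.filter (fun x => !(x == sub)) = g2 := by
          rw [List.filter_eq_self]
          intro x hx
          have hxne : (x == sub) = false := beq_eq_false_iff_ne.mpr (fun h => hnotin (h ▸ hx))
          simp [hxne]
        simp [hfe]
      · simp [hkl]
  · have hgd : d.getD l PySem.Set.empty = PySem.Set.empty :=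
      PySem.Dict.getD_of_not_contains _ _ (by simpa using hc)
    rw [hgd]
    rw [if_neg (by simp [PySem.Set.contains, PySem.Set.empty])]
    conv_lhs => rw [← List.map_id d.items]
    apply List.map_congr_left
    rintro ⟨k2, g2⟩ hkv
    have hkl : k2 ≠ l := by
      intro h
      subst h
      have hmem : k2 ∈ d.keys := by
        simp only [PySem.Dict.keys]
        exact List.mem_map_of_mem hkv
      exact hc ((PySem.Dict.contains_iff_mem_keys _ _).mpr hmem)
    simp [hkl]

theorem removeSub_keys (d : PySem.Dict Int (List (List Int))) (l : Int) (sub : List Int)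
    (hk : d.keys.Nodup) : (removeSub d l sub).keys = d.keys := by
  simp only [PySem.Dict.keys, removeSub_items d l sub hk, List.map_map]
  apply List.map_congr_left
  intro kv _
  simp only [Function.comp_apply]
  split <;> rfl

-- a whole sequence of guarded removals, at the items level
theorem foldl_rm_items : ∀ (steps : List (Int × List Int)) (d : PySem.Dict Int (List (List Int))),
    d.keys.Nodup →
    (steps.foldl (fun d s => removeSub d s.1 s.2) d).items
      = d.items.map (fun kv => (kv.1, kv.2.filter (fun p => !steps.any (fun s => s.1 == kv.1 && p == s.2)))) := by
  intro steps
  induction steps with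
  | nil =>
    intro d _
    rw [List.foldl_nil]
    conv_lhs => rw [← List.map_id d.items]
    apply List.map_congr_left
    rintro ⟨k, g⟩ _
    simp
  | cons s steps ih =>
    intro d hk
    have hk1 : (removeSub d s.1 s.2).keys.Nodup := by rw [removeSub_keys _ _ _ hk]; exact hk
    rw [List.foldl_cons, ih _ hk1, removeSub_items d s.1 s.2 hk, List.map_map]
    apply List.map_congr_left
    rintro ⟨k, g⟩ hkv
    simp only [Function.comp_apply]
    by_cases hkl : k = s.1
    · rw [if_pos hkl]
      simp only [List.filter_filter, List.any_cons]
      refine congrArg (Prod.mk k) ?_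
      apply List.filter_congr
      intro p hp
      have htrue : (s.1 == k) = true := beq_iff_eq.mpr hkl.symm
      simp [htrue, Bool.not_or, Bool.and_comm]
    · rw [if_neg hkl]
      simp only [List.any_cons]
      refine congrArg (Prod.mk k) ?_
      apply List.filter_congr
      intro p hp
      have hfalse : (s.1 == k) = false := beq_eq_false_iff_ne.mpr (Ne.symm hkl)
      simp [hfalse]

-- "p is pruned by some strictly longer superpath whose length class lies in S"
def badB (paths : List (List Int)) (S : List Int) (p : List Int) : Bool :=
  paths.any (fun q => decide ((q.length : Int) ∈ S) && decide (p.length < q.length) && isSubseqB p q)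

theorem badB_nil (paths : List (List Int)) (p : List Int) : badB paths [] p = false := by
  simp [badB]

theorem badB_lift (paths : List (List Int)) (S : List Int) {p q : List Int}
    (hsub : List.Sublist p q) (hlt : p.length < q.length)
    (h : badB paths S q = true) : badB paths S p = true := by
  simp only [badB, List.any_eq_true, Bool.and_eq_true, decide_eq_true_eq, isSubseqB_iff] at h ⊢
  obtain ⟨r, hr, ⟨⟨hmem, hlt2⟩, hsub2⟩⟩ := h
  exact ⟨r, hr, ⟨⟨hmem, Nat.lt_trans hlt hlt2⟩, hsub.trans hsub2⟩⟩

-- lens = sorted(keys)[::-1], as a definition for the proofs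
def lensOf (paths : List (List Int)) : List Int :=
  (PySem.List.sorted (buildGroupsA paths).keys (fun x => x) false).reverse

theorem mem_lensOf (paths : List (List Int)) (hnd : paths.Nodup) (x : Int) :
    x ∈ lensOf paths ↔ ∃ p ∈ paths, (p.length : Int) = x := by
  unfold lensOf
  rw [build_eq paths hnd, List.mem_reverse, PySem.List.mem_sorted, groupsB_keys,
    PySem.Set.mem_ofList, List.mem_map]

theorem pairwise_gt_lensOf (paths : List (List Int)) (hnd : paths.Nodup) :
    (lensOf paths).Pairwise (fun a b => b < a) := by
  unfold lensOf
  rw [build_eq paths hnd, groupsB_keys, List.pairwise_reverse]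
  exact PySem.List.sorted_ofList_pairwise_lt _

theorem length_lensOf (paths : List (List Int)) (hnd : paths.Nodup) :
    (lensOf paths).length = (buildGroupsB paths).items.length := by
  unfold lensOf
  rw [build_eq paths hnd, List.length_reverse, PySem.List.length_sorted]
  simp [PySem.Dict.keys]

-- the heart: processing length class l extends the remover set S by l
theorem point_equiv (paths : List (List Int)) (hnd : paths.Nodup)
    (S : List Int) (l : Int) (rest : List Int) (k : Int) (p : List Int)
    (hlens : lensOf paths = S ++ l :: rest)
    (hp1 : p ∈ paths) (hp2 : (p.length : Int) = k) :
    (badB paths (S ++ [l]) p = true)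
      ↔ (badB paths S p = true
          ∨ (k ∈ rest ∧ ∃ q ∈ paths, (q.length : Int) = l ∧ badB paths S q = false ∧ List.Sublist p q)) := by
  have hpw := pairwise_gt_lensOf paths hnd
  rw [hlens, List.pairwise_append] at hpw
  obtain ⟨hpwS, hpwlr, hcross⟩ := hpw
  rw [List.pairwise_cons] at hpwlr
  obtain ⟨hlgt, _⟩ := hpwlr
  constructor
  · intro h
    simp only [badB, List.any_eq_true, Bool.and_eq_true, decide_eq_true_eq, isSubseqB_iff] at h
    obtain ⟨q, hq, ⟨⟨hmemX, hlt⟩, hsub⟩⟩ := h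
    rcases List.mem_append.mp hmemX with hS | hL
    · left
      simp only [badB, List.any_eq_true, Bool.and_eq_true, decide_eq_true_eq, isSubseqB_iff]
      exact ⟨q, hq, ⟨⟨hS, hlt⟩, hsub⟩⟩
    · have hql : (q.length : Int) = l := List.mem_singleton.mp hL
      by_cases hb : badB paths S q = true
      · left; exact badB_lift paths S hsub hlt hb
      · right
        have hkl : k < l := by
          rw [← hp2, ← hql]; exact_mod_cast hlt
        have hkmem : k ∈ S ++ l :: rest := by
          rw [← hlens]; exact (mem_lensOf paths hnd k).mpr ⟨p, hp1, hp2⟩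
        have hkrest : k ∈ rest := by
          rcases List.mem_append.mp hkmem with h | h
          · have := hcross k h l List.mem_cons_self; omega
          · rcases List.mem_cons.mp h with h | h
            · omega
            · exact h
        have hbf : badB paths S q = false := by simpa using hb
        exact ⟨hkrest, q, hq, hql, hbf, hsub⟩
  · rintro (hb | ⟨hkrest, q, hq, hql, _, hsub⟩)
    · simp only [badB, List.any_eq_true, Bool.and_eq_true, decide_eq_true_eq, isSubseqB_iff] at hb ⊢
      obtain ⟨q, hq, ⟨⟨hS, hlt⟩, hsub⟩⟩ := hb
      exact ⟨q, hq, ⟨⟨List.mem_append_left _ hS, hlt⟩, hsub⟩⟩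
    · have hkl : k < l := hlgt k hkrest
      have hlt : p.length < q.length := by
        have hcast : (p.length : Int) < (q.length : Int) := by rw [hp2, hql]; exact hkl
        exact_mod_cast hcast
      simp only [badB, List.any_eq_true, Bool.and_eq_true, decide_eq_true_eq, isSubseqB_iff]
      exact ⟨q, hq, ⟨⟨List.mem_append_right _ (List.mem_singleton.mpr hql), hlt⟩, hsub⟩⟩

-- composing two filters and changing the predicate pointwise
theorem filter_filter_congr {α : Type} (p q r : α → Bool) (l : List α)
    (h : ∀ x ∈ l, (p x && q x) = r x) : (l.filter q).filter p = l.filter r := by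
  rw [List.filter_filter]
  exact List.filter_congr h

theorem bool_combine {P : Prop} {X Y Z : Bool} (h1 : X = true ↔ P)
    (h2 : Z = true ↔ (Y = true ∨ P)) : (!X && !Y) = !Z := by
  by_cases hz : Z = true
  · rw [hz]
    rcases h2.mp hz with hY | hPp
    · rw [hY]; simp
    · rw [h1.mpr hPp]; simp
  · have hz' : Z = false := Bool.eq_false_iff.mpr hz
    have hy : Y = false := by
      rcases hY : Y with _ | _
      · rfl
      · exact absurd (h2.mpr (Or.inl hY)) hz
    have hx : X = false := by
      rcases hX : X with _ | _
      · rfl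
      · exact absurd (h2.mpr (Or.inr (h1.mp hX))) hz
    rw [hz', hx, hy]
    rfl

-- one outer iteration of A's pruning loop, at the items level
theorem step_items (paths : List (List Int)) (hnd : paths.Nodup)
    (S : List Int) (l : Int) (rest : List Int)
    (hlens : lensOf paths = S ++ l :: rest)
    (d : PySem.Dict Int (List (List Int)))
    (hd : d.items = (buildGroupsB paths).items.map
        (fun kv => (kv.1, kv.2.filter (fun p => !badB paths S p)))) :
    ((d.getD l PySem.Set.empty).foldl
        (fun d path =>
          rest.foldl (fun d lj => (combosA path lj.toNat).foldl (fun d sub => removeSub d lj sub) d) d)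
        d).items
      = (buildGroupsB paths).items.map
          (fun kv => (kv.1, kv.2.filter (fun p => !badB paths (S ++ [l]) p))) := by
  have hknd : d.keys.Nodup := by
    have hkeysd : d.keys = (buildGroupsB paths).keys := by
      simp only [PySem.Dict.keys, hd, List.map_map]
      apply List.map_congr_left
      intro kv _
      rfl
    rw [hkeysd]; exact groupsB_keys_nodup paths
  have hlmem : l ∈ (buildGroupsB paths).keys := by
    have hmem : l ∈ lensOf paths := by
      rw [hlens]; exact List.mem_append_right _ List.mem_cons_self
    unfold lensOf at hmem
    rw [build_eq paths hnd, List.mem_reverse, PySem.List.mem_sorted] at hmem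
    exact hmem
  have hdglmem : (l, (paths.filter (fun p => ((p.length : Int) == l))).filter (fun p => !badB paths S p))
      ∈ d.items := by
    rw [hd]
    exact List.mem_map_of_mem (groupsB_item_of_key paths hlmem)
  have hsnap : d.getD l PySem.Set.empty
      = (paths.filter (fun p => ((p.length : Int) == l))).filter (fun p => !badB paths S p) :=
    PySem.Dict.getD_of_mem_items _ hdglmem hknd _
  rw [hsnap]
  have hflat : (((paths.filter (fun p => ((p.length : Int) == l))).filter (fun p => !badB paths S p)).foldl
        (fun d path =>
          rest.foldl (fun d lj => (combosA path lj.toNat).foldl (fun d sub => removeSub d lj sub) d) d)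
        d)
      = (((paths.filter (fun p => ((p.length : Int) == l))).filter (fun p => !badB paths S p)).flatMap
          (fun path => rest.flatMap (fun lj => (combosA path lj.toNat).map (fun sub => (lj, sub))))).foldl
          (fun d s => removeSub d s.1 s.2) d := by
    simp only [List.foldl_flatMap, List.foldl_map]
  rw [hflat, foldl_rm_items _ d hknd, hd, List.map_map]
  apply List.map_congr_left
  rintro ⟨k, g⟩ hkv
  simp only [Function.comp_apply]
  refine congrArg (Prod.mk k) ?_
  apply filter_filter_congr
  intro p hp
  have hpg : p ∈ paths ∧ (p.length : Int) = k := by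
    have hg := groupsB_item_snd paths hkv
    rw [hg, List.mem_filter] at hp
    exact ⟨hp.1, by simpa using hp.2⟩
  obtain ⟨hp1, hp2⟩ := hpg
  have hany : ((((paths.filter (fun p => ((p.length : Int) == l))).filter (fun p => !badB paths S p)).flatMap
        (fun path => rest.flatMap (fun lj => (combosA path lj.toNat).map (fun sub => (lj, sub))))).any
          (fun s => s.1 == k && p == s.2) = true)
      ↔ (k ∈ rest ∧ ∃ q ∈ paths, (q.length : Int) = l ∧ badB paths S q = false ∧ List.Sublist p q) := by
    simp only [List.any_eq_true, List.mem_flatMap, List.mem_map, Bool.and_eq_true, beq_iff_eq]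
    constructor
    · rintro ⟨s, ⟨path, hpath, lj, hlj, sub, hsub, rfl⟩, h1, h2⟩
      obtain rfl : lj = k := h1
      obtain rfl : p = sub := h2
      rw [mem_combosA] at hsub
      rw [List.mem_filter, List.mem_filter] at hpath
      obtain ⟨⟨hpathp, hpathl⟩, hpathbad⟩ := hpath
      have hpl : (path.length : Int) = l := by simpa using hpathl
      have hpb : badB paths S path = false := by simpa using hpathbad
      exact ⟨hlj, path, hpathp, hpl, hpb, hsub.1⟩
    · rintro ⟨hkrest, q, hq, hql, hqbad, hsub⟩
      have hqlb : ((q.length : Int) == l) = true := by simpa using hql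
      have hqbb : (!badB paths S q) = true := by simpa using hqbad
      refine ⟨(k, p), ⟨q, ?_, k, hkrest, p, ?_, rfl⟩, rfl, rfl⟩
      · rw [List.mem_filter, List.mem_filter]
        exact ⟨⟨hq, hqlb⟩, hqbb⟩
      · rw [mem_combosA]
        refine ⟨hsub, ?_⟩
        have : (p.length : Int) = k := hp2
        omega
  exact bool_combine hany (point_equiv paths hnd S l rest k p hlens hp1 hp2)

-- the pruning loop, fully characterised
theorem prune_inv (paths : List (List Int)) (hnd : paths.Nodup) :
    ∀ (suffix S : List Int) (d : PySem.Dict Int (List (List Int))),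
      lensOf paths = S ++ suffix →
      d.items = (buildGroupsB paths).items.map (fun kv => (kv.1, kv.2.filter (fun p => !badB paths S p))) →
      (pruneLoopA suffix d).items
        = (buildGroupsB paths).items.map
            (fun kv => (kv.1, kv.2.filter (fun p => !badB paths (lensOf paths) p))) := by
  intro suffix
  induction suffix with
  | nil =>
    intro S d hlens hd
    rw [List.append_nil] at hlens
    simpa [pruneLoopA, hlens] using hd
  | cons l rest ih =>
    intro S d hlens hd
    show (pruneLoopA rest _).items = _
    apply ih (S ++ [l])
    · rw [hlens, List.append_assoc]; rfl
    · exact step_items paths hnd S l rest hlens d hd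

-- folding set.union over the values is ofList of their concatenation
theorem foldl_union_eq (vs : List (PySem.Set (List Int))) :
    ∀ (s : PySem.Set (List Int)),
      vs.foldl (fun acc t => PySem.Set.union acc t) s = PySem.Set.update s vs.flatten := by
  induction vs with
  | nil => intro s; rfl
  | cons v vs ih =>
    intro s
    rw [List.foldl_cons, ih, List.flatten_cons, PySem.Set.update_append]
    rfl

-- B's inner loop: conditionally adding is adding the filtered list
theorem foldl_add_if (c : List Int → Bool) :
    ∀ (g : List (List Int)) (out : PySem.Set (List Int)),
      g.foldl (fun out p => if c p then out else PySem.Set.add out p) out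
        = PySem.Set.update out (g.filter (fun p => !c p)) := by
  intro g
  induction g with
  | nil => intro out; rfl
  | cons p g ih =>
    intro out
    rw [List.foldl_cons, ih]
    by_cases h : c p
    · rw [if_pos h]
      simp [h]
    · rw [if_neg h]
      have hf : (!c p) = true := by simp [h]
      simp only [List.filter_cons, hf, if_pos]
      rw [PySem.Set.update_cons]

-- B's outer loop flattened
theorem foldl_outer (paths : List (List Int)) :
    ∀ (its : List (Int × List (List Int))) (s : PySem.Set (List Int)),
      its.foldl
        (fun out kv =>
          kv.2.foldl
            (fun out p =>
              if (paths.filter (fun q => decide (kv.1 < (q.length : Int)))).any (fun q => isSubseqB p q)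
              then out else PySem.Set.add out p) out) s
        = PySem.Set.update s
            (its.flatMap (fun kv => kv.2.filter
              (fun p => !(paths.filter (fun q => decide (kv.1 < (q.length : Int)))).any (fun q => isSubseqB p q)))) := by
  intro its
  induction its with
  | nil => intro s; rfl
  | cons kv its ih =>
    intro s
    rw [List.foldl_cons, foldl_add_if, ih, List.flatMap_cons, PySem.Set.update_append]

theorem alt_eq_ofList (paths : List (List Int)) :
    prune_new_py_alt paths
      = PySem.Set.ofList ((buildGroupsB paths).items.flatMap
          (fun kv => kv.2.filter
            (fun p => !(paths.filter (fun q => decide (kv.1 < (q.length : Int)))).any (fun q => isSubseqB p q)))) := by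
  rw [← PySem.Set.update_nil_left]
  exact foldl_outer paths (buildGroupsB paths).items PySem.Set.empty

-- branch form of A's port
theorem prune_def (paths : List (List Int)) :
    prune_new_py paths
      = if (lensOf paths).length < 2 then paths
        else (pruneLoopA (lensOf paths) (buildGroupsA paths)).values.foldl
          (fun acc s => PySem.Set.union acc s) PySem.Set.empty := rfl

theorem A_eq_ofList (paths : List (List Int)) (hnd : paths.Nodup)
    (h2 : ¬ (lensOf paths).length < 2) :
    prune_new_py paths
      = PySem.Set.ofList ((buildGroupsB paths).items.flatMap
          (fun kv => kv.2.filter (fun p => !badB paths (lensOf paths) p))) := by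
  rw [prune_def, if_neg h2]
  have hbase : (buildGroupsA paths).items
      = (buildGroupsB paths).items.map (fun kv => (kv.1, kv.2.filter (fun p => !badB paths [] p))) := by
    rw [build_eq paths hnd]
    symm
    conv_rhs => rw [← List.map_id (buildGroupsB paths).items]
    apply List.map_congr_left
    rintro ⟨k, g⟩ _
    simp only [id]
    refine congrArg (Prod.mk k) ?_
    rw [List.filter_eq_self.mpr]
    intro x _
    rw [badB_nil]
    rfl
  have hitems := prune_inv paths hnd (lensOf paths) [] (buildGroupsA paths) (by simp) hbase
  have hvals : (pruneLoopA (lensOf paths) (buildGroupsA paths)).values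
      = (buildGroupsB paths).items.map (fun kv => kv.2.filter (fun p => !badB paths (lensOf paths) p)) := by
    simp only [PySem.Dict.values, hitems, List.map_map]
    rfl
  rw [hvals, foldl_union_eq]
  rw [show (PySem.Set.empty : PySem.Set (List Int)) = [] from rfl, PySem.Set.update_nil_left,
    ← List.flatMap_def]

-- the two survivor predicates agree on each group
theorem cond_eq (paths : List (List Int)) (hnd : paths.Nodup)
    {k : Int} {g : List (List Int)} (hkv : (k, g) ∈ (buildGroupsB paths).items)
    (p : List Int) (hp : p ∈ g) :
    ((paths.filter (fun q => decide (k < (q.length : Int)))).any (fun q => isSubseqB p q))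
      = badB paths (lensOf paths) p := by
  have hpg : p ∈ paths ∧ (p.length : Int) = k := by
    have hg := groupsB_item_snd paths hkv
    rw [hg, List.mem_filter] at hp
    exact ⟨hp.1, by simpa using hp.2⟩
  obtain ⟨hp1, hp2⟩ := hpg
  rw [Bool.eq_iff_iff]
  simp only [badB, List.any_eq_true, List.mem_filter, Bool.and_eq_true, decide_eq_true_eq]
  constructor
  · rintro ⟨q, ⟨hq, hlt⟩, hsub⟩
    refine ⟨q, hq, ⟨⟨(mem_lensOf paths hnd _).mpr ⟨q, hq, rfl⟩, ?_⟩, hsub⟩⟩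
    have : (p.length : Int) < (q.length : Int) := hp2 ▸ hlt
    exact_mod_cast this
  · rintro ⟨q, hq, ⟨⟨_, hlt⟩, hsub⟩⟩
    refine ⟨q, ⟨hq, ?_⟩, hsub⟩
    rw [← hp2]
    exact_mod_cast hlt

-- every path's length is the single key when there is at most one length class
theorem all_len_eq (paths : List (List Int)) {k : Int} {g : List (List Int)}
    (hits : (buildGroupsB paths).items = [(k, g)]) :
    ∀ q ∈ paths, (q.length : Int) = k := by
  intro q hq
  have hmem : (q.length : Int) ∈ (buildGroupsB paths).keys := by
    rw [groupsB_keys, PySem.Set.mem_ofList]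
    exact List.mem_map_of_mem hq
  simp only [PySem.Dict.keys, hits] at hmem
  simpa using hmem

theorem prune_eq (paths : List (List Int)) (hnd : paths.Nodup) :
    prune_new_py paths = prune_new_py_alt paths := by
  by_cases h2 : (lensOf paths).length < 2
  · rw [prune_def, if_pos h2, alt_eq_ofList]
    have hlen := length_lensOf paths hnd
    rcases hits : (buildGroupsB paths).items with _ | ⟨⟨k, g⟩, rest⟩
    · have hpaths : paths = [] := by
        rcases hps : paths with _ | ⟨p, ps⟩
        · rfl
        · exfalso
          have hk : (p.length : Int) ∈ (buildGroupsB paths).keys := by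
            rw [groupsB_keys, PySem.Set.mem_ofList, hps]
            exact List.mem_map_of_mem List.mem_cons_self
          simp only [PySem.Dict.keys, hits] at hk
          simp at hk
      subst hpaths
      rfl
    · rcases rest with _ | ⟨kv2, rest⟩
      · have hall := all_len_eq paths hits
        have hkvmem : (k, g) ∈ (buildGroupsB paths).items := by
          rw [hits]; exact List.mem_cons_self
        have hgpaths : g = paths := by
          rw [groupsB_item_snd paths hkvmem, List.filter_eq_self]
          intro q hq
          simpa using hall q hq
        have hlonger : paths.filter (fun q => decide (k < (q.length : Int))) = [] := by
          rw [List.filter_eq_nil_iff]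
          intro q hq
          have := hall q hq
          simp [this]
        rw [List.flatMap_cons, List.flatMap_nil, List.append_nil, hlonger]
        simp only [List.any_nil, Bool.not_false, List.filter_true]
        rw [hgpaths, PySem.Set.ofList_eq_self_of_nodup _ hnd]
      · exfalso
        rw [hlen, hits] at h2
        simp at h2
  · rw [A_eq_ofList paths hnd h2, alt_eq_ofList]
    refine congrArg PySem.Set.ofList ?_
    simp only [List.flatMap_def]
    refine congrArg List.flatten ?_
    apply List.map_congr_left
    rintro ⟨k, g⟩ hkv
    apply List.filter_congr
    intro p hp
    rw [cond_eq paths hnd hkv p hp]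

-- ===== VERDICT (by name: the statement is the Claim_ definition above) =====
theorem prune_new_py_spec : Claim_equal_prune_new_py := by
  intro paths _ hpre
  show prune_new_py paths = prune_new_py_alt paths
  exact prune_eq paths hpre
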